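-- pv_equiv track=rewrite | github.com/Quentin-bp/ML_Mythology | back_end/controllers/Helper.py | extractTokensInName
-- ===== SOURCE A (Python) =====
-- def extractTokensInName(name):
--     voyelles = "aeiouy"
--     syllabes = []
--     syllabe = ""
--
--     for i, char in enumerate(name.lower()):
--         syllabe += char
--         if char in voyelles:
--             if i + 1 == len(name) or name[i + 1].lower() not in voyelles:
--                 syllabes.append(syllabe)
--                 syllabe = ""
--
--     if syllabe:
--         syllabes.append(syllabe)
--
--     return syllabes
-- ===== SOURCE B (Python) =====
-- def extractTokensInName(name):
--     # span-based tokenizer: each outer step slices off one whole token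
--     # (a maximal consonant run followed by a maximal vowel run, or a
--     # trailing consonant-only run), instead of A's char-by-char
--     # accumulator with one-character lookahead.
--     vowels = "aeiouy"
--     tokens = []
--     rest = name.lower()
--     while rest:
--         k = 0
--         while k < len(rest) and rest[k] not in vowels:
--             k += 1
--         while k < len(rest) and rest[k] in vowels:
--             k += 1
--         tokens.append(rest[:k])
--         rest = rest[k:]
--     return tokens
-- ===== Notes on version B (the rewrite author's own statement) =====
-- stated objective: alternative
-- what changed: B slices the lowered name into whole tokens span-at-a-time (maximal consonant run then maximal vowel run per outer step), replacing A's char-by-char accumulator with one-character lookahead into the original string.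
import Mathlib
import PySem

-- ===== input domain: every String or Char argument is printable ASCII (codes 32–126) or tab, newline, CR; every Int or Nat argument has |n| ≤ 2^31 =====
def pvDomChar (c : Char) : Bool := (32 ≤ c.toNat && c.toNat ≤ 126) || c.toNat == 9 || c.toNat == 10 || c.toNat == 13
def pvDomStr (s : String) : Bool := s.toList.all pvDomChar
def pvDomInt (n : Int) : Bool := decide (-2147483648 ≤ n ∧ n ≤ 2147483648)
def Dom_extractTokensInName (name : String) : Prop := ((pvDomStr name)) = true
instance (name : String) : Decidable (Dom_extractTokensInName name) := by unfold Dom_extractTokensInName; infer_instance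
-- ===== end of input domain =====

-- B re-tokenizes span-at-a-time (one whole token per outer step) instead of A's
-- char-by-char accumulator with lookahead; objective: alternative structure, same cost.

-- ===== PORT A =====
-- 'char in voyelles' / "name[i+1].lower() not in voyelles" on a 1-char string = membership
-- in the vowel characters (exact for single characters).
def pvVowels : List Char := ['a', 'e', 'i', 'o', 'u', 'y']

-- Strings built char-by-char are carried as List Char; String.ofList is applied at the end (exact).
-- the loop body: one step of A's for-loop over (i, char)
def pvStepA (name : String) (st : List (List Char) × List Char) (p : Int × Char) :
    List (List Char) × List Char :=
  let syllabe := st.2 ++ [p.2]                   -- syllabe += char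
  if pvVowels.contains p.2 then                  -- if char in voyelles
    -- i + 1 == len(name) or name[i+1].lower() not in voyelles
    -- (the .getD ' ' default is never read: when the first disjunct is false, i+1 < len(name))
    if p.1 + 1 = (name.toList.length : Int) ∨
        ¬ pvVowels.contains (PySem.Chars.lowerChar ((PySem.Str.pyGet? name (p.1 + 1)).getD ' ')) then
      (st.1 ++ [syllabe], [])
    else (st.1, syllabe)
  else (st.1, syllabe)

def extractTokensInName (name : String) : List String :=
  let r := (PySem.List.enumerate (PySem.Chars.lower name.toList)).foldl (pvStepA name) ([], [])
  (if r.2.isEmpty then r.1 else r.1 ++ [r.2]).map String.ofList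

-- ===== PORT B =====
def pvIsVowel (c : Char) : Bool := pvVowels.contains c

theorem pvDropWhileHead {q : Char → Bool} :
    ∀ (s : List Char) (x : Char) (xs : List Char), s.dropWhile q = x :: xs → q x = false := by
  intro s
  induction s with
  | nil => simp
  | cons a t ih =>
    intro x xs h
    by_cases ha : q a
    · rw [List.dropWhile_cons_of_pos ha] at h; exact ih _ _ h
    · rw [List.dropWhile_cons_of_neg ha] at h
      cases h; simpa using ha

-- termination helper for pvFindall: each outer step strictly shrinks the rest
theorem pvRestLt (s : List Char) (h : ¬ s = []) :
    ((s.dropWhile (fun ch => !pvIsVowel ch)).dropWhile pvIsVowel).length < s.length := by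
  rcases hr : s.dropWhile (fun ch => !pvIsVowel ch) with _ | ⟨x, xs⟩
  · simp only [List.dropWhile_nil, List.length_nil]
    exact List.length_pos_of_ne_nil h
  · have hvx : pvIsVowel x = true := by
      have := pvDropWhileHead s x xs hr
      simpa using this
    have h1 : (x :: xs).dropWhile pvIsVowel = xs.dropWhile pvIsVowel := by
      simp [hvx]
    have h2 : (xs.dropWhile pvIsVowel).length ≤ xs.length := List.length_dropWhile_le _ _
    have h3 : (x :: xs).length ≤ s.length := hr ▸ List.length_dropWhile_le _ _
    simp only [h1]
    have : xs.length < (x :: xs).length := by simp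
    omega

-- the two inner 'while' scans of Source B are the two takeWhile/dropWhile span splits;
-- rest[:k] / rest[k:] are the corresponding take/drop of the same spans
def pvFindall (s : List Char) : List (List Char) :=
  if h : s = [] then []
  else
    let c := s.takeWhile (fun ch => !pvIsVowel ch)
    let r1 := s.dropWhile (fun ch => !pvIsVowel ch)
    let v := r1.takeWhile pvIsVowel
    let r2 := r1.dropWhile pvIsVowel
    (c ++ v) :: pvFindall r2
termination_by s.length
decreasing_by exact pvRestLt s h

def extractTokensInName_alt (name : String) : List String :=
  (pvFindall (PySem.Chars.lower name.toList)).map String.ofList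

-- ===== PRECONDITION & SPEC =====
def Spec_extractTokensInName (name : String) (out : List String) : Prop := out = extractTokensInName_alt name
instance (name : String) (out : List String) : Decidable (Spec_extractTokensInName name out) := by unfold Spec_extractTokensInName; infer_instance

-- ===== CLAIM (what is proved, stated in full; the proofs are below) =====
def Claim_equal_extractTokensInName : Prop := ∀ (name : String), Dom_extractTokensInName name → Spec_extractTokensInName name (extractTokensInName name)

-- ===== LEMMAS AND PROOFS =====

-- recursion characterizing A's loop: accumulator + one-char lookahead
def pvFA (acc : List Char) : List Char → List (List Char)
  | [] => if acc.isEmpty then [] else [acc]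
  | c :: t =>
      if pvIsVowel c && (t.isEmpty || !pvIsVowel (t.headD ' '))
      then (acc ++ [c]) :: pvFA [] t
      else pvFA (acc ++ [c]) t

theorem pvFoldEq (name : String) :
    ∀ (t : List Char) (k : ℕ) (res : List (List Char)) (acc : List Char),
      t = (PySem.Chars.lower name.toList).drop k →
      (if ((PySem.List.enumerate t (k : Int)).foldl (pvStepA name) (res, acc)).2.isEmpty
        then ((PySem.List.enumerate t (k : Int)).foldl (pvStepA name) (res, acc)).1
        else ((PySem.List.enumerate t (k : Int)).foldl (pvStepA name) (res, acc)).1 ++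
          [((PySem.List.enumerate t (k : Int)).foldl (pvStepA name) (res, acc)).2]) = res ++ pvFA acc t := by
  intro t
  induction t with
  | nil =>
    intro k res acc _
    by_cases ha : acc.isEmpty <;>
      simp [PySem.List.enumerate_nil, pvFA, ha]
  | cons c t ih =>
    intro k res acc ht
    have hlen : (PySem.Chars.lower name.toList).length = name.toList.length := by
      simp [PySem.Chars.lower]
    have hk : k < (PySem.Chars.lower name.toList).length := by
      by_contra hk
      rw [List.drop_eq_nil_of_le (by omega)] at ht
      simp at ht
    have ht' : t = (PySem.Chars.lower name.toList).drop (k + 1) := by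
      have := congrArg List.tail ht
      simpa [List.tail_drop] using this
    have hcast : (k : Int) + 1 = ((k + 1 : ℕ) : Int) := by push_cast; ring
    rw [PySem.List.enumerate_cons, List.foldl_cons]
    -- evaluate one step of A's loop
    have hcond : ((k : Int) + 1 = (name.toList.length : Int) ∨
        ¬ pvVowels.contains (PySem.Chars.lowerChar ((PySem.Str.pyGet? name ((k : Int) + 1)).getD ' '))) ↔
        (t.isEmpty || !pvIsVowel (t.headD ' ')) = true := by
      rcases hts : t with _ | ⟨d, t'⟩
      · constructor
        · intro _; simp
        · intro _
          left
          have hle : (PySem.Chars.lower name.toList).length ≤ k + 1 := by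
            by_contra hc
            rw [hts] at ht'
            have := congrArg List.length ht'
            simp [List.length_drop] at this
            omega
          have : k + 1 = name.toList.length := by omega
          exact_mod_cast this
      · have hk1 : k + 1 < (PySem.Chars.lower name.toList).length := by
          by_contra hc
          rw [hts, List.drop_eq_nil_of_le (by omega)] at ht'
          exact List.cons_ne_nil d t' ht'
        have hget : (PySem.Str.pyGet? name ((k : Int) + 1)).getD ' ' = name.toList[k + 1]! := by
          rw [hcast, PySem.Str.pyGet?_natCast]
          rw [List.getElem?_eq_getElem (by omega)]
          simp [List.getElem!_eq_getElem?_getD, List.getElem?_eq_getElem (by omega : k + 1 < name.toList.length)]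
        have h2 : (PySem.Chars.lower name.toList).drop (k + 1) = d :: t' := by
          rw [← ht', hts]
        have h3 := List.getElem_cons_drop hk1
        rw [h2] at h3
        have hsd : (PySem.Chars.lower name.toList)[k + 1]'hk1 = d := by
          injection h3
        have hd : PySem.Chars.lowerChar (name.toList[k + 1]!) = d := by
          rw [getElem!_pos name.toList (k + 1) (by omega)]
          rw [← hsd]
          simp [PySem.Chars.lower]
        constructor
        · intro h
          rcases h with h | h
          · exfalso
            rw [hlen] at hk1
            omega
          · rw [hget, hd] at h
            simpa [pvIsVowel] using h
        · intro h
          right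
          rw [hget, hd]
          simp at h
          simpa [pvIsVowel] using h
    by_cases hv : pvIsVowel c
    · by_cases hl : (t.isEmpty || !pvIsVowel (t.headD ' ')) = true
      · have hstep : pvStepA name (res, acc) ((k : Int), c) = (res ++ [acc ++ [c]], []) := by
          simp only [pvStepA]
          rw [if_pos (by simpa [pvIsVowel] using hv), if_pos (hcond.mpr hl)]
        rw [hstep, hcast, ih (k + 1) (res ++ [acc ++ [c]]) [] ht']
        have hfa : pvFA acc (c :: t) = (acc ++ [c]) :: pvFA [] t := by
          simp only [pvFA]
          rw [hv, hl]
          simp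
        rw [hfa]; simp
      · have hstep : pvStepA name (res, acc) ((k : Int), c) = (res, acc ++ [c]) := by
          simp only [pvStepA]
          rw [if_pos (by simpa [pvIsVowel] using hv), if_neg (fun h => hl (hcond.mp h))]
        rw [hstep, hcast, ih (k + 1) res (acc ++ [c]) ht']
        have hX : (t.isEmpty || !pvIsVowel (t.headD ' ')) = false := by
          cases hb : (t.isEmpty || !pvIsVowel (t.headD ' '))
          · rfl
          · exact absurd hb hl
        have hfa : pvFA acc (c :: t) = pvFA (acc ++ [c]) t := by
          simp only [pvFA]
          rw [hv, hX]
          simp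
        rw [hfa]
    · have hstep : pvStepA name (res, acc) ((k : Int), c) = (res, acc ++ [c]) := by
        simp only [pvStepA]
        rw [if_neg (by simpa [pvIsVowel] using hv)]
      rw [hstep, hcast, ih (k + 1) res (acc ++ [c]) ht']
      have hv' : pvIsVowel c = false := by
        cases hb : pvIsVowel c
        · rfl
        · exact absurd hb hv
      have hfa : pvFA acc (c :: t) = pvFA (acc ++ [c]) t := by
        simp only [pvFA]
        rw [hv']
        simp
      rw [hfa]

theorem pvFAtok : ∀ (s : List Char) (acc : List Char), s ≠ [] →
    pvFA acc s =
      (acc ++ (s.takeWhile (fun ch => !pvIsVowel ch) ++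
        (s.dropWhile (fun ch => !pvIsVowel ch)).takeWhile pvIsVowel)) ::
      pvFA [] ((s.dropWhile (fun ch => !pvIsVowel ch)).dropWhile pvIsVowel) := by
  intro s
  induction s with
  | nil => simp
  | cons c t ih =>
    intro acc _
    by_cases hv : pvIsVowel c
    · rcases ht : t with _ | ⟨d, t'⟩
      · simp [pvFA, hv]
      · subst ht
        by_cases hd : pvIsVowel d
        · have h1 : pvFA acc (c :: d :: t') = pvFA (acc ++ [c]) (d :: t') := by
            simp [pvFA, hv, hd]
          rw [h1, ih (acc ++ [c]) (by simp)]
          simp [hv, hd]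
        · simp [pvFA, hv, hd]
    · rcases ht : t with _ | ⟨d, t'⟩
      · simp [pvFA, hv]
      · subst ht
        have h1 : pvFA acc (c :: d :: t') = pvFA (acc ++ [c]) (d :: t') := by
          simp [pvFA, hv]
        rw [h1, ih (acc ++ [c]) (by simp)]
        simp [hv]

theorem pvFAeqFindall (s : List Char) : pvFA [] s = pvFindall s := by
  by_cases h : s = []
  · subst h; simp [pvFA, pvFindall]
  · rw [pvFindall, pvFAtok s [] h]
    simp only [List.nil_append, dif_neg h]
    exact congrArg _ (pvFAeqFindall _)
termination_by s.length
decreasing_by exact pvRestLt s h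

-- ===== VERDICT (by name: the statement is the Claim_ definition above) =====
theorem extractTokensInName_spec : Claim_equal_extractTokensInName := by
  intro name _
  unfold Spec_extractTokensInName extractTokensInName extractTokensInName_alt
  have h0 := pvFoldEq name (PySem.Chars.lower name.toList) 0 [] [] (by simp)
  simp only [Nat.cast_zero] at h0
  simp only [h0, List.nil_append, pvFAeqFindall]
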